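-- pv_equiv track=rewrite | github.com/kthk84/Music-Library | shazam_cache.py | merge_shazam_tracks
-- ===== SOURCE A (Python) =====
-- from typing import List, Dict, Any, Optional
--
-- def _track_key(t: Dict) -> tuple:
--     return (str(t.get("artist", "")).strip().lower(), str(t.get("title", "")).strip().lower())
--
-- def merge_shazam_tracks(existing: List[Dict], new: List[Dict]) -> tuple:
--     """
--     Merge new Shazam tracks into existing. No duplicates (by artist+title).
--     New tracks are appended. For duplicates, prefer new (updated shazamed_at).
--     Returns (merged_list, added_count).
--     """
--     by_key: Dict[tuple, Dict] = {_track_key(t): t for t in existing}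
--     added = 0
--     for t in new:
--         k = _track_key(t)
--         if k not in by_key:
--             added += 1
--         by_key[k] = t  # prefer new (may have newer shazamed_at)
--     # Order: new first (newest Shazam order), then existing-only
--     result = []
--     seen = set()
--     for t in new:
--         k = _track_key(t)
--         if k not in seen:
--             result.append(by_key[k])
--             seen.add(k)
--     for t in existing:
--         k = _track_key(t)
--         if k not in seen:
--             result.append(by_key[k])
--             seen.add(k)
--     return result, added
-- ===== SOURCE B (Python) =====
-- from typing import List, Dict, Any, Optional
--
-- def _track_key(t: Dict) -> tuple:
--     return (str(t.get("artist", "")).strip().lower(), str(t.get("title", "")).strip().lower())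
--
-- def merge_shazam_tracks(existing: List[Dict], new: List[Dict]) -> tuple:
--     """
--     Merge new Shazam tracks into existing (dedup by artist+title, new tracks
--     first, duplicates prefer the newest value) with no dict/set bookkeeping at
--     all: pure positional list scans. A key's slot is its first occurrence; its
--     value is fetched by a reverse scan (last occurrence wins).
--     """
--     nk = [_track_key(t) for t in new]
--     ek = [_track_key(t) for t in existing]
--
--     def last_with_key(ts, k):
--         return next(t for t in reversed(ts) if _track_key(t) == k)
--
--     new_part = [last_with_key(new, k) for i, k in enumerate(nk) if k not in nk[:i]]
--     old_part = [last_with_key(existing, k) for i, k in enumerate(ek)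
--                 if k not in ek[:i] and k not in nk]
--     added = sum(1 for i, k in enumerate(nk) if k not in nk[:i] and k not in ek)
--     return new_part + old_part, added
-- ===== Notes on version B (the rewrite author's own statement) =====
-- stated objective: alternative
-- what changed: Drops A's hash containers entirely (by_key dict, seen set, added counter loop): B is pure positional list comprehensions -- a slot is a key's first occurrence (tested with 'k not in keys[:i]'), its value is found by a reverse scan for the last occurrence, and 'added' is a single filtered count; trades A's O(n+m) hashing for quadratic scans.
import Mathlib
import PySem

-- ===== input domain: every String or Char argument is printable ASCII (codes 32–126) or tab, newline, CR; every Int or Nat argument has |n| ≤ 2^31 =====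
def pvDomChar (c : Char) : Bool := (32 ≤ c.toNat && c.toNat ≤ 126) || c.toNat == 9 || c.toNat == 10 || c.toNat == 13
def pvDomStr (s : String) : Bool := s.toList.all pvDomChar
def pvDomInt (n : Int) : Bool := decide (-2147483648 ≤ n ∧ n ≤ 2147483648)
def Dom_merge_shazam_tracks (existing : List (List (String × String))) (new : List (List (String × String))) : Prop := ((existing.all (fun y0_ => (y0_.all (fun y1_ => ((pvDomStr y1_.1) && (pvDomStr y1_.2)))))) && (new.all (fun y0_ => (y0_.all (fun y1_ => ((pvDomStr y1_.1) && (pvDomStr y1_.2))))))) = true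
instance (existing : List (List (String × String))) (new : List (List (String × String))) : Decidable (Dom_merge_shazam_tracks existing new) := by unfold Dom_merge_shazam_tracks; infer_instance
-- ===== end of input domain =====

-- B drops A's hash containers (by_key dict, seen set, counter loop) for pure positional
-- list scans: first-occurrence slots via 'k not in keys[:i]', values via a reverse scan
-- for the last occurrence (objective: alternative; quadratic instead of hashed linear).

-- ===== PORT A =====
-- t.get(k, "") on a track dict: first-match assoc-list lookup per the type convention
def pyget (t : List (String × String)) (k dflt : String) : String :=
  match t.find? (fun p => p.1 == k) with
  | some p => p.2
  | none => dflt

def trackKey (t : List (String × String)) : String × String :=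
  (PySem.Str.lower (PySem.Str.strip (pyget t "artist" "")),
   PySem.Str.lower (PySem.Str.strip (pyget t "title" "")))

def merge_shazam_tracks (existing : List (List (String × String))) (new : List (List (String × String))) : (List (List (String × String))) × Int :=
  let by_key0 : PySem.Dict (String × String) (List (String × String)) :=
    existing.foldl (fun d t => d.insert (trackKey t) t) PySem.Dict.empty
  let st :=
    new.foldl (fun (q : PySem.Dict (String × String) (List (String × String)) × Int) t =>
      (q.1.insert (trackKey t) t, if q.1.contains (trackKey t) then q.2 else q.2 + 1)) (by_key0, 0)
  -- by_key[k] below can never raise KeyError (k was just inserted); [] is the unreachable default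
  let r1 :=
    new.foldl (fun (q : List (List (String × String)) × PySem.Set (String × String)) t =>
      if PySem.Set.contains q.2 (trackKey t) then q
      else (q.1 ++ [st.1.getD (trackKey t) []], PySem.Set.add q.2 (trackKey t))) ([], PySem.Set.empty)
  let r2 :=
    existing.foldl (fun (q : List (List (String × String)) × PySem.Set (String × String)) t =>
      if PySem.Set.contains q.2 (trackKey t) then q
      else (q.1 ++ [st.1.getD (trackKey t) []], PySem.Set.add q.2 (trackKey t))) r1
  (r2.1, st.2)

-- ===== PORT B =====
-- next(t for t in reversed(ts) if _track_key(t) == k); [] is the unreachable StopIteration default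
def lastWithKey (ts : List (List (String × String))) (k : String × String) : List (String × String) :=
  (ts.reverse.find? (fun t => trackKey t == k)).getD []

def merge_shazam_tracks_alt (existing : List (List (String × String))) (new : List (List (String × String))) : (List (List (String × String))) × Int :=
  let nk := new.map trackKey
  let ek := existing.map trackKey
  let new_part := ((PySem.List.enumerate nk).filter
      (fun p => !(PySem.List.slice nk none (some p.1)).contains p.2)).map
      (fun p => lastWithKey new p.2)
  let old_part := ((PySem.List.enumerate ek).filter
      (fun p => !(PySem.List.slice ek none (some p.1)).contains p.2 && !(nk.contains p.2))).map
      (fun p => lastWithKey existing p.2)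
  let added : Int := (((PySem.List.enumerate nk).filter
      (fun p => !(PySem.List.slice nk none (some p.1)).contains p.2 && !(ek.contains p.2))).length : Int)
  (new_part ++ old_part, added)

-- ===== PRECONDITION & SPEC =====
def Spec_merge_shazam_tracks (existing : List (List (String × String))) (new : List (List (String × String))) (out : (List (List (String × String))) × Int) : Prop := out = merge_shazam_tracks_alt existing new
instance (existing : List (List (String × String))) (new : List (List (String × String))) (out : (List (List (String × String))) × Int) : Decidable (Spec_merge_shazam_tracks existing new out) := by unfold Spec_merge_shazam_tracks; infer_instance

-- ===== CLAIM (what is proved, stated in full; the proofs are below) =====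
def Claim_equal_merge_shazam_tracks : Prop := ∀ (existing : List (List (String × String))) (new : List (List (String × String))), Dom_merge_shazam_tracks existing new → Spec_merge_shazam_tracks existing new (merge_shazam_tracks existing new)

-- ===== LEMMAS AND PROOFS =====

-- first occurrences of the keys of `ks` that are not already in `s`, in order
def newOnes {κ : Type} [BEq κ] (s : PySem.Set κ) : List κ → List κ
  | [] => []
  | k :: ks => if PySem.Set.contains s k then newOnes s ks else k :: newOnes (PySem.Set.add s k) ks

lemma add_eq_self {κ : Type} [BEq κ] (s : PySem.Set κ) (k : κ)
    (h : PySem.Set.contains s k = true) : PySem.Set.add s k = s := by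
  simp only [PySem.Set.add, h, if_true]

lemma add_eq_append {κ : Type} [BEq κ] (s : PySem.Set κ) (k : κ)
    (h : PySem.Set.contains s k = false) : PySem.Set.add s k = s ++ [k] := by
  simp only [PySem.Set.add, h, Bool.false_eq_true, if_false]

lemma contains_add {κ : Type} [BEq κ] [LawfulBEq κ] (s : PySem.Set κ) (x k : κ) :
    PySem.Set.contains (PySem.Set.add s x) k = (PySem.Set.contains s k || k == x) := by
  by_cases h : PySem.Set.contains s x = true
  · rw [add_eq_self _ _ h]
    by_cases hk : k = x
    · subst hk; simp only [beq_self_eq_true, Bool.or_true]; exact h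
    · simp [hk]
  · rw [add_eq_append _ _ (by simpa using h)]
    simp only [PySem.Set.contains, List.contains_append]
    congr 1
    by_cases hk : k = x <;> simp [List.contains_eq_mem, hk]

lemma find?_singleton_key {κ α : Type} [BEq κ] [LawfulBEq κ] [DecidableEq κ] (key : α → κ) (a : α) (k : κ) :
    List.find? (fun t => key t == k) [a] = if key a = k then some a else none := by
  by_cases h : key a = k
  · simp [List.find?, h]
  · have hb : (key a == k) = false := by simp [h]
    simp [List.find?, hb, h]

lemma mem_of_mem_newOnes {κ : Type} [BEq κ] :
    ∀ (ks : List κ) (s : PySem.Set κ) (k : κ), k ∈ newOnes s ks → k ∈ ks := by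
  intro ks
  induction ks with
  | nil => intro s k h; simp [newOnes] at h
  | cons a ks ih =>
    intro s k h
    simp only [newOnes] at h
    by_cases hc : PySem.Set.contains s a = true
    · simp only [hc, if_true] at h
      exact List.mem_cons_of_mem _ (ih _ _ h)
    · simp only [hc, Bool.false_eq_true, if_false, List.mem_cons] at h
      rcases h with h | h
      · exact h ▸ List.mem_cons_self
      · exact List.mem_cons_of_mem _ (ih _ _ h)

lemma contains_of_mem_newOnes {κ : Type} [BEq κ] [LawfulBEq κ] :
    ∀ (ks : List κ) (s : PySem.Set κ) (k : κ), k ∈ newOnes s ks → PySem.Set.contains s k = false := by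
  intro ks
  induction ks with
  | nil => intro s k h; simp [newOnes] at h
  | cons a ks ih =>
    intro s k h
    simp only [newOnes] at h
    by_cases hc : PySem.Set.contains s a = true
    · simp only [hc, if_true] at h
      exact ih _ _ h
    · simp only [hc, Bool.false_eq_true, if_false, List.mem_cons] at h
      rcases h with h | h
      · subst h; simpa using hc
      · have := ih _ _ h
        rw [contains_add] at this
        exact (Bool.or_eq_false_iff.mp this).1

lemma filter_newOnes {κ : Type} [BEq κ] [LawfulBEq κ] (q : κ → Bool) :
    ∀ (ks : List κ) (s s' : PySem.Set κ),
      (∀ k, q k = true → PySem.Set.contains s k = PySem.Set.contains s' k) →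
      (newOnes s ks).filter q = newOnes s' (ks.filter q) := by
  intro ks
  induction ks with
  | nil => intro s s' _; simp [newOnes]
  | cons a ks ih =>
    intro s s' H
    by_cases hq : q a = true
    · have heq := H a hq
      by_cases hc : PySem.Set.contains s a = true
      · rw [List.filter_cons_of_pos hq]
        simp only [newOnes, hc, if_true, ← heq]
        exact ih s s' H
      · have hc' : PySem.Set.contains s' a = false := by rw [← heq]; simpa using hc
        rw [List.filter_cons_of_pos hq]
        simp only [newOnes, hc, hc', Bool.false_eq_true, if_false]
        rw [List.filter_cons_of_pos hq]
        refine congrArg (a :: ·) ?_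
        apply ih
        intro k hk
        rw [contains_add, contains_add, H k hk]
    · have hqf : q a = false := by simpa using hq
      rw [List.filter_cons_of_neg (by simp [hqf])]
      by_cases hc : PySem.Set.contains s a = true
      · simp only [newOnes, hc, if_true]
        exact ih s s' H
      · simp only [newOnes, hc, Bool.false_eq_true, if_false]
        rw [List.filter_cons_of_neg (by simp [hqf])]
        apply ih
        intro k hk
        rw [contains_add, H k hk]
        have hka : (k == a) = false := by
          by_cases hka : k = a
          · subst hka; rw [hqf] at hk; exact absurd hk (by simp)
          · simp [hka]
        simp [hka]

lemma get?_keyfold {κ α : Type} [BEq κ] [LawfulBEq κ] [DecidableEq κ] (key : α → κ) :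
    ∀ (l : List α) (d : PySem.Dict κ α) (k : κ),
      (l.foldl (fun d t => d.insert (key t) t) d).get? k
        = (l.reverse.find? (fun t => key t == k)).or (d.get? k) := by
  intro l
  induction l with
  | nil => intro d k; simp
  | cons a l ih =>
    intro d k
    simp only [List.foldl_cons, List.reverse_cons, List.find?_append]
    rw [ih, PySem.Dict.get?_insert, Option.or_assoc]
    congr 1
    rw [find?_singleton_key key a k]
    by_cases h : k = key a
    · subst h; simp
    · rw [if_neg h, if_neg (fun hh => h (Eq.symm hh))]
      simp

lemma dictkeys_insert_eq_add {κ α : Type} [BEq κ] [LawfulBEq κ] (d : PySem.Dict κ α) (k : κ) (v : α) :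
    (d.insert k v).keys = PySem.Set.add d.keys k := by
  by_cases hc : d.contains k = true
  · rw [PySem.Dict.keys_insert_of_contains d v hc]
    have hs : PySem.Set.contains d.keys k = true := by
      simp [PySem.Set.contains, List.contains_eq_mem,
        (PySem.Dict.contains_iff_mem_keys d k).mp hc]
    rw [add_eq_self _ _ hs]
  · have hcf : d.contains k = false := by simpa using hc
    rw [PySem.Dict.keys_insert_of_not_contains d v hcf]
    have hs : PySem.Set.contains d.keys k = false := by
      simp only [PySem.Set.contains, List.contains_eq_mem, decide_eq_false_iff_not]
      exact fun h => hc ((PySem.Dict.contains_iff_mem_keys d k).mpr h)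
    rw [add_eq_append _ _ hs]

lemma addfold_eq {κ α : Type} [BEq κ] [LawfulBEq κ] (key : α → κ) :
    ∀ (l : List α) (d : PySem.Dict κ α) (n : Int),
      l.foldl (fun (q : PySem.Dict κ α × Int) t =>
          (q.1.insert (key t) t, if q.1.contains (key t) then q.2 else q.2 + 1)) (d, n)
        = (l.foldl (fun d t => d.insert (key t) t) d,
           n + ((newOnes d.keys (l.map key)).length : Int)) := by
  intro l
  induction l with
  | nil => intro d n; simp [newOnes]
  | cons a l ih =>
    intro d n
    simp only [List.foldl_cons, List.map_cons]
    by_cases hc : d.contains (key a) = true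
    · have hset : PySem.Set.contains d.keys (key a) = true := by
        simp [PySem.Set.contains, List.contains_eq_mem,
          (PySem.Dict.contains_iff_mem_keys d (key a)).mp hc]
      rw [ih, dictkeys_insert_eq_add, add_eq_self _ _ hset]
      simp only [newOnes, hset, if_true, hc]
    · have hset : PySem.Set.contains d.keys (key a) = false := by
        simp only [PySem.Set.contains, List.contains_eq_mem, decide_eq_false_iff_not]
        exact fun h => hc ((PySem.Dict.contains_iff_mem_keys d (key a)).mpr h)
      rw [ih, dictkeys_insert_eq_add]
      simp only [newOnes, hset, Bool.false_eq_true, if_false, hc, List.length_cons,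
        Prod.mk.injEq]
      refine ⟨trivial, ?_⟩
      push_cast
      ring

lemma resultfold_eq {κ α β : Type} [BEq κ] [LawfulBEq κ] (key : α → κ) (f : κ → β) :
    ∀ (l : List α) (acc : List β) (seen : PySem.Set κ),
      l.foldl (fun (q : List β × PySem.Set κ) t =>
          if PySem.Set.contains q.2 (key t) then q
          else (q.1 ++ [f (key t)], PySem.Set.add q.2 (key t))) (acc, seen)
        = (acc ++ (newOnes seen (l.map key)).map f, PySem.Set.update seen (l.map key)) := by
  intro l
  induction l with
  | nil => intro acc seen; simp [newOnes, PySem.Set.update]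
  | cons a l ih =>
    intro acc seen
    simp only [List.foldl_cons, List.map_cons]
    by_cases hc : PySem.Set.contains seen (key a) = true
    · simp only [hc, if_true, ih, newOnes, PySem.Set.update, List.foldl_cons,
        add_eq_self _ _ hc]
    · simp only [hc, Bool.false_eq_true, if_false, ih, newOnes, List.map_cons,
        PySem.Set.update, List.foldl_cons, List.append_assoc, List.singleton_append]

lemma resultfold_getD_eq {κ α : Type} [BEq κ] [LawfulBEq κ] (key : α → κ)
    (B : PySem.Dict κ α) (dflt : α) (l : List α) (acc : List α) (seen : PySem.Set κ) :
    l.foldl (fun (q : List α × PySem.Set κ) t =>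
        if PySem.Set.contains q.2 (key t) then q
        else (q.1 ++ [B.getD (key t) dflt], PySem.Set.add q.2 (key t))) (acc, seen)
      = (acc ++ (newOnes seen (l.map key)).map (fun k => B.getD k dflt),
         PySem.Set.update seen (l.map key)) :=
  resultfold_eq key (fun k => B.getD k dflt) l acc seen

lemma keys_keyfold_empty {κ α : Type} [BEq κ] [LawfulBEq κ] (key : α → κ) (l : List α) :
    (l.foldl (fun d t => d.insert (key t) t) (PySem.Dict.empty : PySem.Dict κ α)).keys
      = PySem.Set.ofList (l.map key) := by
  have h := PySem.Dict.keys_foldl_insert_key l key (fun _ t => t) (PySem.Dict.empty : PySem.Dict κ α)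
  rw [PySem.Dict.keys_empty] at h
  exact h

lemma update_empty_eq_ofList {κ : Type} [BEq κ] (ks : List κ) :
    PySem.Set.update PySem.Set.empty ks = PySem.Set.ofList ks := rfl

lemma contains_ofList_eq {κ : Type} [BEq κ] [LawfulBEq κ] (l : List κ) (k : κ) :
    PySem.Set.contains (PySem.Set.ofList l) k = l.contains k := by
  simp only [PySem.Set.contains, List.contains_eq_mem]
  simp [PySem.Set.mem_ofList]

lemma find?_rev_isSome {κ α : Type} [BEq κ] [LawfulBEq κ] (key : α → κ) (l : List α) (k : κ)
    (hmem : k ∈ l.map key) :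
    ∃ v, List.find? (fun t => key t == k) l.reverse = some v := by
  cases hfind : List.find? (fun t => key t == k) l.reverse with
  | some v => exact ⟨v, rfl⟩
  | none =>
    exfalso
    obtain ⟨t, ht, hkey⟩ := List.mem_map.mp hmem
    have := List.find?_eq_none.mp hfind t (List.mem_reverse.mpr ht)
    simp [hkey] at this

lemma find?_rev_eq_none {κ α : Type} [BEq κ] [LawfulBEq κ] (key : α → κ) (l : List α) (k : κ)
    (hmem : k ∉ l.map key) :
    List.find? (fun t => key t == k) l.reverse = none := by
  refine List.find?_eq_none.mpr ?_
  intro t ht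
  simp only [beq_iff_eq]
  intro h
  exact hmem (h ▸ List.mem_map.mpr ⟨t, List.mem_reverse.mp ht, rfl⟩)

-- dropping keys a set already contains does not change newOnes
lemma newOnes_filter_of_contains {κ : Type} [BEq κ] [LawfulBEq κ] (q : κ → Bool) :
    ∀ (ks : List κ) (s : PySem.Set κ),
      (∀ k, q k = false → PySem.Set.contains s k = true) →
      newOnes s (ks.filter q) = newOnes s ks := by
  intro ks
  induction ks with
  | nil => intro s _; simp
  | cons a ks ih =>
    intro s H
    by_cases hq : q a = true
    · rw [List.filter_cons_of_pos hq]
      by_cases hc : PySem.Set.contains s a = true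
      · simp only [newOnes, hc, if_true]
        exact ih s H
      · simp only [newOnes, hc, Bool.false_eq_true, if_false]
        refine congrArg (a :: ·) (ih _ ?_)
        intro k hk
        rw [contains_add, H k hk]
        rfl
    · have hqf : q a = false := by simpa using hq
      rw [List.filter_cons_of_neg (by simp [hqf])]
      simp only [newOnes, H a hqf, if_true]
      exact ih s H

-- B's 'first occurrence and not in other' scan equals A's seen-set order over the other-set
lemma filter_newOnes_empty_eq {κ : Type} [BEq κ] [LawfulBEq κ] (other ks : List κ) :
    (newOnes PySem.Set.empty ks).filter (fun k => !(other.contains k))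
      = newOnes (PySem.Set.ofList other) ks := by
  rw [filter_newOnes (fun k => !(other.contains k)) ks PySem.Set.empty (PySem.Set.ofList other)
      (fun k hk => by
        have hk' : other.contains k = false := by simpa using hk
        rw [contains_ofList_eq, hk']
        rfl)]
  exact newOnes_filter_of_contains _ ks _ (fun k hk => by
    have hk' : other.contains k = true := by simpa using hk
    rw [contains_ofList_eq]
    exact hk')

-- the positional scan 'k not in ks[:i]' is exactly the newOnes traversal
lemma scan_filter {κ β : Type} [BEq κ] [LawfulBEq κ] (q : κ → Bool) (f : κ → β) :
    ∀ (rest : List κ) (i : Nat) (ks : List κ) (s : PySem.Set κ),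
      ks.drop i = rest →
      (∀ k, (ks.take i).contains k = PySem.Set.contains s k) →
      ((PySem.List.enumerate rest (i : Int)).filter
          (fun p => !(PySem.List.slice ks none (some p.1)).contains p.2 && q p.2)).map
          (fun p => f p.2)
        = ((newOnes s rest).filter q).map f := by
  intro rest
  induction rest with
  | nil => intro i ks s _ _; simp [PySem.List.enumerate_nil, newOnes]
  | cons k rest ih =>
    intro i ks s hdrop htake
    have hi : i < ks.length := by
      by_contra h
      rw [List.drop_eq_nil_of_le (by omega)] at hdrop
      exact List.cons_ne_nil _ _ hdrop.symm
    have hgi : ks[i]? = some k := by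
      have : (ks.drop i)[0]? = some k := by rw [hdrop]; rfl
      simpa using this
    have hdrop' : ks.drop (i + 1) = rest := by
      have : ks.drop (i + 1) = (ks.drop i).drop 1 := by
        rw [List.drop_drop]
      rw [this, hdrop]
      rfl
    have htake' : ∀ x, (ks.take (i + 1)).contains x = PySem.Set.contains (PySem.Set.add s k) x := by
      intro x
      rw [List.take_add_one, hgi]
      simp only [Option.toList_some, List.contains_append, htake x, contains_add]
      congr 1
      simp [List.contains_eq_mem]
    have hslice : PySem.List.slice ks none (some ((i : Nat) : Int)) = ks.take i :=
      PySem.List.slice_to_natCast ks i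
    rw [PySem.List.enumerate_cons]
    have hcast : ((i : Int) + 1) = (((i + 1 : Nat)) : Int) := by push_cast; ring
    rw [hcast]
    simp only [List.filter_cons, hslice, htake k]
    by_cases hc : PySem.Set.contains s k = true
    · simp only [hc, Bool.not_true, Bool.false_and, Bool.false_eq_true, if_false]
      rw [ih (i + 1) ks (PySem.Set.add s k) hdrop' htake']
      rw [add_eq_self _ _ hc]
      simp only [newOnes, hc, if_true]
    · have hcf : PySem.Set.contains s k = false := by simpa using hc
      simp only [hcf, Bool.not_false, Bool.true_and]
      by_cases hq : q k = true
      · simp only [hq, if_true, List.map_cons]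
        rw [ih (i + 1) ks (PySem.Set.add s k) hdrop' htake']
        have hstep : List.filter q (newOnes s (k :: rest))
            = k :: List.filter q (newOnes (PySem.Set.add s k) rest) := by
          simp only [newOnes, hcf, Bool.false_eq_true, if_false]
          exact List.filter_cons_of_pos hq
        rw [hstep, List.map_cons]
      · have hqf : q k = false := by simpa using hq
        simp only [hqf, Bool.false_eq_true, if_false]
        rw [ih (i + 1) ks (PySem.Set.add s k) hdrop' htake']
        have hstep : List.filter q (newOnes s (k :: rest))
            = List.filter q (newOnes (PySem.Set.add s k) rest) := by
          simp only [newOnes, hcf, Bool.false_eq_true, if_false]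
          exact List.filter_cons_of_neg (by simp [hqf])
        rw [hstep]

lemma scan0 {κ β : Type} [BEq κ] [LawfulBEq κ] (q : κ → Bool) (f : κ → β) (ks : List κ) :
    ((PySem.List.enumerate ks 0).filter
        (fun p => !(PySem.List.slice ks none (some p.1)).contains p.2 && q p.2)).map
        (fun p => f p.2)
      = ((newOnes PySem.Set.empty ks).filter q).map f := by
  have h := scan_filter q f ks 0 ks PySem.Set.empty rfl (fun k => rfl)
  simpa using h

lemma scan0_length {κ : Type} [BEq κ] [LawfulBEq κ] (q : κ → Bool) (ks : List κ) :
    ((PySem.List.enumerate ks 0).filter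
        (fun p => !(PySem.List.slice ks none (some p.1)).contains p.2 && q p.2)).length
      = ((newOnes PySem.Set.empty ks).filter q).length := by
  have h := congrArg List.length (scan0 q (fun _ => ()) ks)
  simpa using h

lemma scan0_true {κ β : Type} [BEq κ] [LawfulBEq κ] (f : κ → β) (ks : List κ) :
    ((PySem.List.enumerate ks 0).filter
        (fun p => !(PySem.List.slice ks none (some p.1)).contains p.2)).map
        (fun p => f p.2)
      = (newOnes PySem.Set.empty ks).map f := by
  have h := scan0 (fun _ => true) f ks
  simpa using h

-- ===== VERDICT (by name: the statement is the Claim_ definition above) =====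
theorem merge_shazam_tracks_spec : Claim_equal_merge_shazam_tracks := by
  intro existing nw _
  show merge_shazam_tracks existing nw = merge_shazam_tracks_alt existing nw
  simp only [merge_shazam_tracks, merge_shazam_tracks_alt]
  rw [addfold_eq trackKey]
  simp only [resultfold_getD_eq]
  simp only [List.nil_append, zero_add]
  rw [scan0_true (fun k => lastWithKey nw k) (nw.map trackKey),
      scan0 (fun k => !((nw.map trackKey).contains k)) (fun k => lastWithKey existing k)
        (existing.map trackKey),
      scan0_length (fun k => !((existing.map trackKey).contains k)) (nw.map trackKey)]
  simp only [Prod.mk.injEq]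
  refine ⟨?_, ?_⟩
  · rw [update_empty_eq_ofList, filter_newOnes_empty_eq]
    congr 1
    · apply List.map_congr_left
      intro k hk
      have hmem : k ∈ nw.map trackKey := mem_of_mem_newOnes _ _ _ hk
      obtain ⟨v, hv⟩ := find?_rev_isSome trackKey nw k hmem
      rw [PySem.Dict.getD_eq_get?_getD, get?_keyfold trackKey nw, hv]
      simp [lastWithKey, hv]
    · apply List.map_congr_left
      intro k hk
      have hkek : k ∈ existing.map trackKey := mem_of_mem_newOnes _ _ _ hk
      have hcf := contains_of_mem_newOnes _ _ _ hk
      have hknk : k ∉ nw.map trackKey := by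
        rw [contains_ofList_eq] at hcf
        simpa [List.contains_eq_mem] using hcf
      obtain ⟨v, hv⟩ := find?_rev_isSome trackKey existing k hkek
      rw [PySem.Dict.getD_eq_get?_getD, get?_keyfold trackKey nw,
        find?_rev_eq_none trackKey nw k hknk, Option.none_or,
        get?_keyfold trackKey existing, hv]
      simp [lastWithKey, hv]
  · rw [keys_keyfold_empty trackKey existing, filter_newOnes_empty_eq]
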